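-- pv_equiv track=rewrite | github.com/ontodev/valve.rs | test/generate_data.py | get_sql_type
-- ===== SOURCE A (Python) =====
-- def get_sql_type(dt_config, datatype_name):
--     datatype = dt_config.get(datatype_name)
--     if not datatype:
--         raise Exception(f"No such datatype: {datatype_name}")
--
--     sql_type = datatype.get("SQL type")
--     if sql_type:
--         return sql_type
--
--     return get_sql_type(dt_config, datatype["parent"])
-- ===== SOURCE B (Python) =====
-- def get_sql_type(dt_config, datatype_name):
--     # Phase 1: collect the visited parent chain (with cycle detection).
--     chain = []
--     name = datatype_name
--     while name in dt_config and name not in chain: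
--         chain.append(name)
--         name = dt_config[name].get("parent")
--     # Phase 2: the answer is the first truthy "SQL type" along the chain.
--     for n in chain:
--         t = dt_config[n].get("SQL type")
--         if t:
--             return t
--     raise Exception(f"No such datatype: {name}")
-- ===== Notes on version B (the rewrite author's own statement) =====
-- stated objective: alternative
-- what changed: Two staged passes instead of A's self-recursive check-and-descend: B first materialises the list of visited datatype names along the parent chain (stopping on a missing key or a revisit), then scans that list for the first truthy 'SQL type'.
import Mathlib
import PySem

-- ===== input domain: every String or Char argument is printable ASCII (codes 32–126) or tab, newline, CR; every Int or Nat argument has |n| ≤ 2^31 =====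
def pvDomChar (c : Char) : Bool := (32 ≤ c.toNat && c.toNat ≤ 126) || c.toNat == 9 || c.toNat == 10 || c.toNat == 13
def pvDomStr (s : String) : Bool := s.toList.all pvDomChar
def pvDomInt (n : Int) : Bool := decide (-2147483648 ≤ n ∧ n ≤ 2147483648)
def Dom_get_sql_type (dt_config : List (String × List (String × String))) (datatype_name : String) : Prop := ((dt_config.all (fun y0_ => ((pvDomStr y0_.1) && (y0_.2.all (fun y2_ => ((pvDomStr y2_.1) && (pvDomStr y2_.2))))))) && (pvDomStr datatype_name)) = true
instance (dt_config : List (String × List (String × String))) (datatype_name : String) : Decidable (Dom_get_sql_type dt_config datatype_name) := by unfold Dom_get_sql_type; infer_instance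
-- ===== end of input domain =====

-- B replaces A's self-recursive check-and-descend by two staged passes (collect the visited
-- parent chain, then scan it for the first truthy "SQL type"); equivalence of return values.

-- dt_config arrives as an association list; the Python receives it as a dict, so lookups go
-- through PySem.Dict.ofList (later duplicates overwrite, exactly Python's dict(pairs)).
def pvDtGet (dt_config : List (String × List (String × String))) (name : String) :
    Option (List (String × String)) :=
  (PySem.Dict.ofList dt_config).get? name

-- ===== PORT A =====
-- A raises where the port returns "" or runs out of fuel; Pre_ excludes exactly those inputs,
-- and under Pre_ the chain visits distinct keys so fuel (length + 1) is never exhausted.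
def getSqlTypeA (dt_config : List (String × List (String × String))) :
    Nat → String → String
  | 0, _ => ""
  | fuel + 1, datatype_name =>
    match pvDtGet dt_config datatype_name with
    | none => ""                      -- raise Exception(f"No such datatype: …")
    | some datatype =>
      if datatype = [] then ""        -- `not datatype`: empty dict is falsy → raise
      else
        match (PySem.Dict.ofList datatype).get? "SQL type" with
        | some sql_type =>
          if sql_type ≠ "" then sql_type
          else
            match (PySem.Dict.ofList datatype).get? "parent" with
            | some p => getSqlTypeA dt_config fuel p
            | none => ""              -- KeyError
        | none =>
          match (PySem.Dict.ofList datatype).get? "parent" with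
          | some p => getSqlTypeA dt_config fuel p
          | none => ""                -- KeyError

def get_sql_type (dt_config : List (String × List (String × String))) (datatype_name : String) : String :=
  getSqlTypeA dt_config (dt_config.length + 1) datatype_name

-- ===== PORT B =====
-- Phase 1 of Source B: the while-loop collecting the visited chain.  State is the current `name`
-- (Option: `dt_config[name].get("parent")` may yield None) and the chain built so far.  The
-- loop body runs at most once per distinct key of the dict (it appends a fresh present key
-- each time), so fuel (length + 1) is never exhausted and the port is exact on every input.
def pvChain (dt_config : List (String × List (String × String))) :
    Nat → Option String → List String → List String
  | 0, _, chain => chain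
  | _ + 1, none, chain => chain                      -- `name in dt_config` is False for None
  | fuel + 1, some name, chain =>
    match pvDtGet dt_config name with
    | none => chain                                  -- `name in dt_config` is False
    | some d =>
      if name ∈ chain then chain                     -- `name not in chain` is False
      else pvChain dt_config fuel ((PySem.Dict.ofList d).get? "parent") (chain ++ [name])

-- Phase 2 of Source B: the for-loop returning the first truthy "SQL type" along the chain.
-- Every chain entry is a present key, so dt_config[n] is (pvDtGet …).getD [].
def pvScan (dt_config : List (String × List (String × String))) : List String → String
  | [] => ""                                         -- raise Exception(f"No such datatype: …")
  | n :: rest =>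
    match (PySem.Dict.ofList ((pvDtGet dt_config n).getD [])).get? "SQL type" with
    | some t => if t ≠ "" then t else pvScan dt_config rest
    | none => pvScan dt_config rest

def get_sql_type_alt (dt_config : List (String × List (String × String))) (datatype_name : String) : String :=
  pvScan dt_config (pvChain dt_config (dt_config.length + 1) (some datatype_name) [])

-- ===== PRECONDITION & SPEC =====
-- spec-side description of one hop of the chain (never used by either port)
def pvNext (dt_config : List (String × List (String × String))) (name : String) : String :=
  (((pvDtGet dt_config name).getD []) |> PySem.Dict.ofList |>.get? "parent").getD ""

-- the n-th ancestor of `name` along "parent" links: the pure iterate of the one-hop map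
def pvIter (dt_config : List (String × List (String × String))) (name : String) (n : Nat) : String :=
  (pvNext dt_config)^[n] name

-- the walk may continue from `name`: entry exists, truthy, SQL type falsy, parent present
def pvStepOk (dt_config : List (String × List (String × String))) (name : String) : Bool :=
  match pvDtGet dt_config name with
  | none => false
  | some d =>
    d ≠ [] &&
    (match (PySem.Dict.ofList d).get? "SQL type" with
     | some s => s = ""
     | none => true) &&
    ((PySem.Dict.ofList d).get? "parent").isSome

-- the walk returns at `name`: entry exists, truthy, SQL type truthy
def pvEndOk (dt_config : List (String × List (String × String))) (name : String) : Bool :=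
  match pvDtGet dt_config name with
  | none => false
  | some d =>
    d ≠ [] &&
    (match (PySem.Dict.ofList d).get? "SQL type" with
     | some s => s ≠ ""
     | none => false)

-- Pre_: the parent chain from datatype_name reaches, within |dt_config| hops, a datatype whose
-- "SQL type" is truthy, every hop before it passing A's guards (entry present and truthy, SQL
-- type falsy, "parent" key present).  Exactly the inputs on which the Python A returns: on any
-- other input A raises (missing/empty datatype, missing parent key) or recurses forever on a cycle.
def Pre_get_sql_type (dt_config : List (String × List (String × String))) (datatype_name : String) : Prop :=
  ∃ n ∈ List.range (dt_config.length + 1),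
    pvEndOk dt_config (pvIter dt_config datatype_name n) = true ∧
    ∀ m ∈ List.range n, pvStepOk dt_config (pvIter dt_config datatype_name m) = true

instance (dt_config : List (String × List (String × String))) (datatype_name : String) : Decidable (Pre_get_sql_type dt_config datatype_name) := by
  unfold Pre_get_sql_type; infer_instance

def pvWitness_get_sql_type : (List (String × List (String × String))) × String :=
  ([("int", [("SQL type", "INTEGER")]), ("nat", [("parent", "int")])], "nat")

def Spec_get_sql_type (dt_config : List (String × List (String × String))) (datatype_name : String) (out : String) : Prop := out = get_sql_type_alt dt_config datatype_name
instance (dt_config : List (String × List (String × String))) (datatype_name : String) (out : String) : Decidable (Spec_get_sql_type dt_config datatype_name out) := by unfold Spec_get_sql_type; infer_instance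

-- ===== CLAIM (what is proved, stated in full; the proofs are below) =====
def Claim_equal_get_sql_type : Prop := ∀ (dt_config : List (String × List (String × String))) (datatype_name : String), Dom_get_sql_type dt_config datatype_name → Pre_get_sql_type dt_config datatype_name → Spec_get_sql_type dt_config datatype_name (get_sql_type dt_config datatype_name)

-- ===== LEMMAS AND PROOFS =====

-- the value returned at a terminal name
def pvSqlVal (dt_config : List (String × List (String × String))) (name : String) : String :=
  ((((pvDtGet dt_config name).getD []) |> PySem.Dict.ofList |>.get? "SQL type").getD "")

theorem pvIter_succ' (cfg : List (String × List (String × String))) (name : String) (n : Nat) :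
    pvIter cfg name (n + 1) = pvNext cfg (pvIter cfg name n) :=
  Function.iterate_succ_apply' (pvNext cfg) n name

theorem pvIter_shift (cfg : List (String × List (String × String))) (name : String) (n : Nat) :
    pvIter cfg name (n + 1) = pvIter cfg (pvNext cfg name) n :=
  Function.iterate_succ_apply (pvNext cfg) n name

-- unfold one step of A's fuel recursion (structural, so rfl)
theorem getA_succ (cfg : List (String × List (String × String))) (fuel : Nat) (name : String) :
    getSqlTypeA cfg (fuel + 1) name =
      (match pvDtGet cfg name with
       | none => ""
       | some datatype =>
         if datatype = [] then ""
         else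
           match (PySem.Dict.ofList datatype).get? "SQL type" with
           | some sql_type =>
             if sql_type ≠ "" then sql_type
             else
               match (PySem.Dict.ofList datatype).get? "parent" with
               | some p => getSqlTypeA cfg fuel p
               | none => ""
           | none =>
             match (PySem.Dict.ofList datatype).get? "parent" with
             | some p => getSqlTypeA cfg fuel p
             | none => "") := rfl

-- A's recursion computes pvSqlVal at the end of the chain
theorem getA_eq (cfg : List (String × List (String × String))) :
    ∀ (n fuel : Nat) (name : String), n < fuel →
      pvEndOk cfg (pvIter cfg name n) = true →
      (∀ m < n, pvStepOk cfg (pvIter cfg name m) = true) →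
      getSqlTypeA cfg fuel name = pvSqlVal cfg (pvIter cfg name n) := by
  intro n
  induction n with
  | zero =>
    intro fuel name hf hend _
    match fuel, hf with
    | f + 1, _ =>
      simp only [pvIter, Function.iterate_zero_apply] at hend ⊢
      unfold pvEndOk at hend
      unfold getSqlTypeA pvSqlVal
      cases h : pvDtGet cfg name with
      | none => simp [h] at hend
      | some d =>
        rw [h] at hend
        simp only [Option.getD_some]
        by_cases hd : d = []
        · simp [hd] at hend
        · simp only [hd, Bool.and_eq_true, decide_eq_true_eq, ne_eq] at hend ⊢
          cases hs : (PySem.Dict.ofList d).get? "SQL type" with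
          | none => rw [hs] at hend; simp at hend
          | some s =>
            rw [hs] at hend
            simp only [decide_eq_true_eq] at hend
            simp [hend.2]
  | succ k ih =>
    intro fuel name hf hend hsteps
    match fuel, hf with
    | f + 1, hf =>
      have hstep0 := hsteps 0 (Nat.succ_pos k)
      simp only [pvIter, Function.iterate_zero_apply] at hstep0
      unfold pvStepOk at hstep0
      cases h : pvDtGet cfg name with
      | none => simp [h] at hstep0
      | some d =>
        rw [h] at hstep0
        simp only [Bool.and_eq_true, decide_eq_true_eq, ne_eq, Option.isSome_iff_exists] at hstep0
        obtain ⟨⟨hd, hsql⟩, p, hp⟩ := hstep0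
        have hnext : pvNext cfg name = p := by
          simp [pvNext, h, hp]
        have hrec : getSqlTypeA cfg (f + 1) name = getSqlTypeA cfg f p := by
          rw [getA_succ]
          simp only [h, if_neg hd]
          cases hs : (PySem.Dict.ofList d).get? "SQL type" with
          | none => simp [hp]
          | some s =>
            rw [hs] at hsql
            simp only [decide_eq_true_eq] at hsql
            simp [hsql, hp]
        rw [hrec]
        have hend' : pvEndOk cfg (pvIter cfg p k) = true := by
          rw [← hnext, ← pvIter_shift]; exact hend
        have hsteps' : ∀ m < k, pvStepOk cfg (pvIter cfg p m) = true := by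
          intro m hm
          rw [← hnext, ← pvIter_shift]
          exact hsteps (m + 1) (Nat.succ_lt_succ hm)
        rw [ih f p (Nat.lt_of_succ_lt_succ hf) hend' hsteps']
        rw [← hnext, ← pvIter_shift]

-- determinism of the spec-side chain: equal names iterate equally
theorem pvIter_congr (cfg : List (String × List (String × String))) (name : String)
    (i j : Nat) (h : pvIter cfg name i = pvIter cfg name j) :
    ∀ k, pvIter cfg name (i + k) = pvIter cfg name (j + k) := by
  intro k
  induction k with
  | zero => simpa using h
  | succ m ih =>
    show pvIter cfg name (i + m + 1) = pvIter cfg name (j + m + 1)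
    rw [pvIter_succ', pvIter_succ', ih]

-- stepOk and endOk are mutually exclusive (falsy vs truthy "SQL type")
theorem step_end_exclusive (cfg : List (String × List (String × String))) (x : String)
    (hs : pvStepOk cfg x = true) (he : pvEndOk cfg x = true) : False := by
  unfold pvStepOk at hs
  unfold pvEndOk at he
  cases h : pvDtGet cfg x with
  | none => rw [h] at hs; simp at hs
  | some d =>
    simp only [h] at hs he
    cases h2 : (PySem.Dict.ofList d).get? "SQL type" with
    | none => simp only [h2] at he; simp at he
    | some s =>
      simp only [h2, Bool.and_eq_true, decide_eq_true_eq] at hs he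
      exact he.2 (by simpa using hs.1.2)

-- under the Pre_ hypotheses the chain names up to n are pairwise distinct
theorem pvIter_distinct (cfg : List (String × List (String × String))) (name : String)
    (n : Nat) (hend : pvEndOk cfg (pvIter cfg name n) = true)
    (hsteps : ∀ m < n, pvStepOk cfg (pvIter cfg name m) = true) :
    ∀ i j, i < j → j ≤ n → pvIter cfg name i ≠ pvIter cfg name j := by
  intro i j hij hjn heq
  have hkey := pvIter_congr cfg name i j heq (n - j)
  have hjnk : j + (n - j) = n := by omega
  rw [hjnk] at hkey
  have hlt : i + (n - j) < n := by omega
  exact step_end_exclusive cfg (pvIter cfg name n)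
    (hkey ▸ hsteps (i + (n - j)) hlt) hend

-- phase 1 only ever appends to the chain it is given
theorem pvChain_extends (cfg : List (String × List (String × String))) :
    ∀ (fuel : Nat) (st : Option String) (ch : List String),
      ∃ t, pvChain cfg fuel st ch = ch ++ t := by
  intro fuel
  induction fuel with
  | zero => intro st ch; exact ⟨[], by simp [pvChain]⟩
  | succ f ih =>
    intro st ch
    match st with
    | none => exact ⟨[], by simp [pvChain]⟩
    | some name =>
      unfold pvChain
      cases h : pvDtGet cfg name with
      | none => exact ⟨[], by simp⟩
      | some d =>
        by_cases hm : name ∈ ch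
        · exact ⟨[], by simp [hm]⟩
        · obtain ⟨t, ht⟩ := ih ((PySem.Dict.ofList d).get? "parent") (ch ++ [name])
          exact ⟨name :: t, by simp [hm, ht]⟩

-- under the Pre_ hypotheses phase 1, started at hop j with the first j names collected,
-- produces a chain beginning with the first n+1 names of the spec-side walk
theorem pvChain_builds (cfg : List (String × List (String × String))) (name : String)
    (n : Nat) (hend : pvEndOk cfg (pvIter cfg name n) = true)
    (hsteps : ∀ m < n, pvStepOk cfg (pvIter cfg name m) = true) :
    ∀ (fuel j : Nat), j ≤ n → n + 1 - j ≤ fuel →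
      ∃ t, pvChain cfg fuel (some (pvIter cfg name j))
              ((List.range j).map (pvIter cfg name)) =
            (List.range (n + 1)).map (pvIter cfg name) ++ t := by
  intro fuel
  induction fuel with
  | zero => intro j hj hf; omega
  | succ f ih =>
    intro j hj hf
    -- the entry at the current hop exists (from stepOk or endOk)
    have hget : ∃ d, pvDtGet cfg (pvIter cfg name j) = some d := by
      rcases Nat.lt_or_ge j n with hlt | hge
      · have := hsteps j hlt
        unfold pvStepOk at this
        cases h : pvDtGet cfg (pvIter cfg name j) with
        | none => rw [h] at this; simp at this
        | some d => exact ⟨d, rfl⟩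
      · have hjn : j = n := le_antisymm hj hge
        subst hjn
        unfold pvEndOk at hend
        cases h : pvDtGet cfg (pvIter cfg name j) with
        | none => rw [h] at hend; simp at hend
        | some d => exact ⟨d, rfl⟩
    obtain ⟨d, hd⟩ := hget
    have hnotmem : pvIter cfg name j ∉ (List.range j).map (pvIter cfg name) := by
      intro hmem
      obtain ⟨i, hi, heq⟩ := List.mem_map.mp hmem
      rw [List.mem_range] at hi
      exact pvIter_distinct cfg name n hend hsteps i j hi hj heq
    have hrangesucc : (List.range j).map (pvIter cfg name) ++ [pvIter cfg name j] =
        (List.range (j + 1)).map (pvIter cfg name) := by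
      rw [List.range_succ, List.map_append]; rfl
    unfold pvChain
    simp only [hd, if_neg hnotmem]
    rcases Nat.lt_or_ge j n with hlt | hge
    · -- descend: the parent key is present and equals the next hop
      have hstep := hsteps j hlt
      unfold pvStepOk at hstep
      rw [hd] at hstep
      simp only [Bool.and_eq_true, Option.isSome_iff_exists] at hstep
      obtain ⟨-, p, hp⟩ := hstep
      have hnext : pvIter cfg name (j + 1) = p := by
        rw [pvIter_succ']
        simp [pvNext, hd, hp]
      rw [hp, hrangesucc, ← hnext]
      exact ih (j + 1) (by omega) (by omega)
    · -- terminal hop: the chain already contains the whole prefix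
      have hjn : j = n := le_antisymm hj hge
      subst hjn
      rw [hrangesucc]
      exact pvChain_extends cfg f _ _

-- phase 2 skips every name whose "SQL type" is falsy
theorem pvScan_skip (cfg : List (String × List (String × String))) :
    ∀ (l rest : List String), (∀ x ∈ l, pvStepOk cfg x = true) →
      pvScan cfg (l ++ rest) = pvScan cfg rest := by
  intro l
  induction l with
  | nil => intro rest _; rfl
  | cons x xs ih =>
    intro rest hall
    have hx := hall x (List.mem_cons_self)
    have ihx := ih rest (fun y hy => hall y (List.mem_cons_of_mem x hy))
    unfold pvStepOk at hx
    rw [List.cons_append]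
    show (match (PySem.Dict.ofList ((pvDtGet cfg x).getD [])).get? "SQL type" with
          | some t => if t ≠ "" then t else pvScan cfg (xs ++ rest)
          | none => pvScan cfg (xs ++ rest)) = pvScan cfg rest
    cases h : pvDtGet cfg x with
    | none => simp only [h] at hx; simp at hx
    | some d =>
      simp only [h, Option.getD_some] at hx ⊢
      cases hs : (PySem.Dict.ofList d).get? "SQL type" with
      | none => exact ihx
      | some s =>
        simp only [hs, Bool.and_eq_true, decide_eq_true_eq] at hx
        simp only [hx.1.2, ne_eq, not_true_eq_false, if_false]
        exact ihx

-- phase 2 returns pvSqlVal at the first truthy name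
theorem pvScan_hit (cfg : List (String × List (String × String))) (x : String)
    (rest : List String) (h : pvEndOk cfg x = true) :
    pvScan cfg (x :: rest) = pvSqlVal cfg x := by
  unfold pvEndOk at h
  unfold pvScan pvSqlVal
  cases hg : pvDtGet cfg x with
  | none => rw [hg] at h; simp at h
  | some d =>
    rw [hg] at h
    simp only [Option.getD_some, Bool.and_eq_true, decide_eq_true_eq] at h ⊢
    cases hs : (PySem.Dict.ofList d).get? "SQL type" with
    | none => rw [hs] at h; simp at h
    | some s =>
      rw [hs] at h
      simp only [decide_eq_true_eq] at h
      simp [h.2]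

-- ===== VERDICT (by name: the statement is the Claim_ definition above) =====
theorem get_sql_type_spec : Claim_equal_get_sql_type := by
  intro cfg name _ hpre
  obtain ⟨n, hn, hend, hsteps⟩ := hpre
  rw [List.mem_range] at hn
  have hsteps' : ∀ m < n, pvStepOk cfg (pvIter cfg name m) = true := by
    intro m hm; exact hsteps m (List.mem_range.mpr hm)
  unfold Spec_get_sql_type get_sql_type get_sql_type_alt
  rw [getA_eq cfg n (cfg.length + 1) name hn hend hsteps']
  obtain ⟨t, ht⟩ := pvChain_builds cfg name n hend hsteps' (cfg.length + 1) 0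
    (Nat.zero_le n) (by omega)
  simp only [List.range_zero, List.map_nil] at ht
  rw [show (some name) = some (pvIter cfg name 0) from rfl, ht,
      List.range_succ, List.map_append, List.append_assoc]
  rw [pvScan_skip cfg ((List.range n).map (pvIter cfg name)) _
      (by intro x hx
          obtain ⟨i, hi, heq⟩ := List.mem_map.mp hx
          rw [List.mem_range] at hi
          exact heq ▸ hsteps' i hi)]
  exact (pvScan_hit cfg (pvIter cfg name n) t hend).symm
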